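-- pv_equiv track=rewrite | github.com/Vera-Emelianenko/BI_2021_fastqc | fastqc.py | get_quality_base_one_col
-- ===== SOURCE A (Python) =====
-- def get_seq_quality(input_fastq_list):
--     seq_quality = []
--     for i in range(0, len(input_fastq_list)):
--         if (i+1) % 4 == 0:
--             decoded = []
--             for el in input_fastq_list[i]:
--                 decoded.append(ord(el)-33)
--             seq_quality.append(decoded)
--     return(seq_quality)
--
-- def get_quality_base_one_col(input_fastq_list):
--     input = get_seq_quality(input_fastq_list)
--     bases_one_col = {"quality": [], "read_number": [], "position": []}
--     for i in range(0, len(input)):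
--         for j in range(0, len(input[i])):
--             bases_one_col["quality"].append(input[i][j])
--             bases_one_col["read_number"].append(i)
--             bases_one_col["position"].append(j + 1)
--     return(bases_one_col)
-- ===== SOURCE B (Python) =====
-- def get_quality_base_one_col(input_fastq_list):
--     quality, read_number, position = [], [], []
--     r = 0
--     for i, line in enumerate(input_fastq_list):
--         if (i + 1) % 4 == 0:
--             for j, ch in enumerate(line):
--                 quality.append(ord(ch) - 33)
--                 read_number.append(r)
--                 position.append(j + 1)
--             r += 1
--     return {"quality": quality, "read_number": read_number, "position": position}
-- ===== Notes on version B (the rewrite author's own statement) =====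
-- stated objective: simpler
-- what changed: B fuses A's two phases (build a decoded list-of-lists, then flatten it into three parallel columns via a dict of lists) into a single enumerate pass with an explicit quality-read counter, never materializing the intermediate list-of-lists or indexing with range/len.
import Mathlib
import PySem

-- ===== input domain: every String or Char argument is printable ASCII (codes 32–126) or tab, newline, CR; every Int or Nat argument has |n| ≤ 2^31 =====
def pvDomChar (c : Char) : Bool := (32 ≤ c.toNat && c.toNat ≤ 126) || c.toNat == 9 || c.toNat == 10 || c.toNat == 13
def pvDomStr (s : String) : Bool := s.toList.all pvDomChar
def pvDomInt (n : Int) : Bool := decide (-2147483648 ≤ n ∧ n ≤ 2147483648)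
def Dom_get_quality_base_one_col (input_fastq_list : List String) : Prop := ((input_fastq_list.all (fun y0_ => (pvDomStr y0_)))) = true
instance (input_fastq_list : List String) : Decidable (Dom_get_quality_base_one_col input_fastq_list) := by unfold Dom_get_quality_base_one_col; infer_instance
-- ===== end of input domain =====

-- B fuses A's two phases into one indexed pass with a quality-read counter, never materializing the decoded list-of-lists (objective: simpler).

-- ===== PORT A =====
def get_seq_quality (input_fastq_list : List String) : List (List Int) :=
  (PySem.List.pyRange 0 (input_fastq_list.length : Int) 1).foldl
    (fun acc i =>
      if PySem.Int.mod (i + 1) 4 == 0 then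
        acc ++ [(PySem.List.pyGetD input_fastq_list i "").toList.foldl
                  (fun d el => d ++ [(el.toNat : Int) - 33]) []]
      else acc) []

def get_quality_base_one_col (input_fastq_list : List String) : List (String × List Int) :=
  let input := get_seq_quality input_fastq_list
  let d0 : PySem.Dict String (List Int) :=
    PySem.Dict.ofList [("quality", []), ("read_number", []), ("position", [])]
  let d :=
    (PySem.List.pyRange 0 (input.length : Int) 1).foldl
      (fun d i =>
        (PySem.List.pyRange 0 ((PySem.List.pyGetD input i []).length : Int) 1).foldl
          (fun d j =>
            ((d.modify "quality" [] (fun l => l ++ [PySem.List.pyGetD (PySem.List.pyGetD input i []) j 0])).modify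
                "read_number" [] (fun l => l ++ [i])).modify
              "position" [] (fun l => l ++ [j + 1])) d) d0
  d.items

-- ===== PORT B =====
def get_quality_base_one_col_alt (input_fastq_list : List String) : List (String × List Int) :=
  let st :=
    (PySem.List.enumerate input_fastq_list).foldl
      (fun (st : List Int × List Int × List Int × Int) p =>
        if PySem.Int.mod (p.1 + 1) 4 == 0 then
          let t :=
            (PySem.List.enumerate p.2.toList).foldl
              (fun (t : List Int × List Int × List Int) c =>
                (t.1 ++ [(c.2.toNat : Int) - 33], t.2.1 ++ [st.2.2.2], t.2.2 ++ [c.1 + 1]))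
              (st.1, st.2.1, st.2.2.1)
          (t.1, t.2.1, t.2.2, st.2.2.2 + 1)
        else st)
      ([], [], [], 0)
  [("quality", st.1), ("read_number", st.2.1), ("position", st.2.2.1)]

-- ===== PRECONDITION & SPEC =====
def Spec_get_quality_base_one_col (input_fastq_list : List String) (out : List (String × List Int)) : Prop := out = get_quality_base_one_col_alt input_fastq_list
instance (input_fastq_list : List String) (out : List (String × List Int)) : Decidable (Spec_get_quality_base_one_col input_fastq_list out) := by unfold Spec_get_quality_base_one_col; infer_instance

-- ===== CLAIM (what is proved, stated in full; the proofs are below) =====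
def Claim_equal_get_quality_base_one_col : Prop := ∀ (input_fastq_list : List String), Dom_get_quality_base_one_col input_fastq_list → Spec_get_quality_base_one_col input_fastq_list (get_quality_base_one_col input_fastq_list)

-- ===== LEMMAS AND PROOFS =====

-- a quality string, decoded
def pvDecode (s : String) : List Int := s.toList.map (fun c => (c.toNat : Int) - 33)

-- the decoded quality reads among positions a, a+1, … of the remaining lines
def pvSeqQ : List String → Int → List (List Int)
  | [], _ => []
  | x :: t, a => if PySem.Int.mod (a + 1) 4 == 0 then pvDecode x :: pvSeqQ t (a + 1) else pvSeqQ t (a + 1)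

-- one flattening step: read ds with read number i appended onto the three columns
def pvInner (i : Int) (ds : List Int) (st : List Int × List Int × List Int) : List Int × List Int × List Int :=
  (PySem.List.enumerate ds).foldl
    (fun t c => (t.1 ++ [c.2], t.2.1 ++ [i], t.2.2 ++ [c.1 + 1])) st

def pvOuter (m : List (List Int)) (a : Int) (st : List Int × List Int × List Int) : List Int × List Int × List Int :=
  (PySem.List.enumerate m a).foldl (fun st p => pvInner p.1 p.2 st) st

theorem pv_foldl_range_enum {α β : Type} (d : α) (g : β → Int → α → β) :
    ∀ (t : List α) (a : Nat) (ys : List α) (init : β), ys.drop a = t →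
      (PySem.List.pyRange (a : Int) (ys.length : Int) 1).foldl
          (fun acc i => g acc i (PySem.List.pyGetD ys i d)) init
        = (PySem.List.enumerate t (a : Int)).foldl (fun acc c => g acc c.1 c.2) init := by
  intro t
  induction t with
  | nil =>
      intro a ys init h
      have hlen : ys.length ≤ a := List.drop_eq_nil_iff.mp h
      rw [PySem.List.pyRange_one_eq_nil (by exact_mod_cast hlen)]
      simp [PySem.List.enumerate]
  | cons x t ih =>
      intro a ys init h
      have ha : a < ys.length := by
        have := congrArg List.length h
        simp at this
        omega
      have hget : ys[a]? = some x := by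
        have h0 := List.getElem?_drop (xs := ys) (j := 0) (i := a)
        rw [h] at h0
        simpa using h0.symm
      have hgd : PySem.List.pyGetD ys (a : Int) d = x := by
        rw [PySem.List.pyGetD_natCast, List.getD_eq_getElem?_getD, hget]
        rfl
      rw [PySem.List.pyRange_one_cons (by exact_mod_cast ha)]
      simp only [List.foldl_cons]
      have hcast : ((a : Int) + 1) = ((a + 1 : Nat) : Int) := by push_cast; ring
      rw [hcast, ih (a + 1) ys _ (by rw [← List.drop_drop, h]; simp)]
      rw [hgd, PySem.List.enumerate_cons, hcast]
      simp

theorem pv_enumerate_map {α β : Type} (f : α → β) :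
    ∀ (xs : List α) (a : Int),
      PySem.List.enumerate (xs.map f) a = (PySem.List.enumerate xs a).map (fun p => (p.1, f p.2)) := by
  intro xs
  induction xs with
  | nil => intro a; simp [PySem.List.enumerate]
  | cons x t ih => intro a; simp [PySem.List.enumerate_cons, ih]

theorem pv_decode_fold (s : String) :
    s.toList.foldl (fun d (el : Char) => d ++ [(el.toNat : Int) - 33]) [] = pvDecode s := by
  rw [PySem.List.foldl_append_singleton_eq_map]
  simp [pvDecode]

theorem pv_seq_filter :
    ∀ (xs : List String) (a : Int) (acc : List (List Int)),
      (PySem.List.enumerate xs a).foldl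
          (fun acc c => if PySem.Int.mod (c.1 + 1) 4 == 0 then acc ++ [pvDecode c.2] else acc) acc
        = acc ++ pvSeqQ xs a := by
  intro xs
  induction xs with
  | nil => intro a acc; simp [PySem.List.enumerate, pvSeqQ]
  | cons x t ih =>
      intro a acc
      simp only [PySem.List.enumerate_cons, List.foldl_cons]
      by_cases h : (PySem.Int.mod (a + 1) 4 == 0) = true
      · rw [if_pos h, ih]
        simp only [pvSeqQ, h, if_true, List.append_assoc, List.singleton_append]
      · rw [if_neg h, ih]
        simp only [pvSeqQ, h, if_false, Bool.false_eq_true]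

theorem pv_seqA (xs : List String) : get_seq_quality xs = pvSeqQ xs 0 := by
  unfold get_seq_quality
  have := pv_foldl_range_enum (d := "")
    (g := fun (acc : List (List Int)) (i : Int) (s : String) =>
      if PySem.Int.mod (i + 1) 4 == 0 then
        acc ++ [s.toList.foldl (fun d el => d ++ [(el.toNat : Int) - 33]) []]
      else acc) xs 0 xs [] (by simp)
  simp only [Nat.cast_zero] at this
  rw [this]
  have : ∀ (acc : List (List Int)),
      (PySem.List.enumerate xs 0).foldl
        (fun acc c => if PySem.Int.mod (c.1 + 1) 4 == 0 then
            acc ++ [c.2.toList.foldl (fun d el => d ++ [(el.toNat : Int) - 33]) []] else acc) acc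
      = (PySem.List.enumerate xs 0).foldl
        (fun acc c => if PySem.Int.mod (c.1 + 1) 4 == 0 then acc ++ [pvDecode c.2] else acc) acc := by
    intro acc
    apply PySem.List.foldl_congr_mem
    intro acc c _
    rw [pv_decode_fold]
  rw [this, pv_seq_filter xs 0 []]
  simp

-- the dict state of A's flattening loop keeps the literal three-key shape; one read's inner loop is pvInner
theorem pv_modify3 (q r p : List Int) (v i jp : Int) :
    (((PySem.Dict.mk [("quality", q), ("read_number", r), ("position", p)]).modify
          "quality" [] (fun l => l ++ [v])).modify
        "read_number" [] (fun l => l ++ [i])).modify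
      "position" [] (fun l => l ++ [jp])
    = PySem.Dict.mk [("quality", q ++ [v]), ("read_number", r ++ [i]), ("position", p ++ [jp])] := rfl

theorem pv_dict_inner (i : Int) (ds : List Int) :
    ∀ (a : Int) (q r p : List Int),
      (PySem.List.enumerate ds a).foldl
          (fun d c =>
            ((d.modify "quality" [] (fun l => l ++ [c.2])).modify
                "read_number" [] (fun l => l ++ [i])).modify
              "position" [] (fun l => l ++ [c.1 + 1]))
          (PySem.Dict.mk [("quality", q), ("read_number", r), ("position", p)])
        = (fun t : List Int × List Int × List Int =>
            PySem.Dict.mk [("quality", t.1), ("read_number", t.2.1), ("position", t.2.2)])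
            ((PySem.List.enumerate ds a).foldl
              (fun t c => (t.1 ++ [c.2], t.2.1 ++ [i], t.2.2 ++ [c.1 + 1])) (q, r, p)) := by
  induction ds with
  | nil => intro a q r p; simp [PySem.List.enumerate]
  | cons x t ih =>
      intro a q r p
      simp only [PySem.List.enumerate_cons, List.foldl_cons]
      rw [pv_modify3, ih]

-- A's dict-building outer loop, as pvOuter on the three columns
theorem pv_dict_outer (m : List (List Int)) :
    ∀ (a : Int) (q r p : List Int),
      (PySem.List.enumerate m a).foldl
          (fun d pp =>
            (PySem.List.enumerate pp.2).foldl
              (fun d c =>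
                ((d.modify "quality" [] (fun l => l ++ [c.2])).modify
                    "read_number" [] (fun l => l ++ [pp.1])).modify
                  "position" [] (fun l => l ++ [c.1 + 1])) d)
          (PySem.Dict.mk [("quality", q), ("read_number", r), ("position", p)])
        = (fun t : List Int × List Int × List Int =>
            PySem.Dict.mk [("quality", t.1), ("read_number", t.2.1), ("position", t.2.2)])
            (pvOuter m a (q, r, p)) := by
  induction m with
  | nil => intro a q r p; simp [PySem.List.enumerate, pvOuter]
  | cons x t ih =>
      intro a q r p
      simp only [PySem.List.enumerate_cons, List.foldl_cons, pvOuter]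
      rw [pv_dict_inner, ih]
      rfl

-- A = the three columns of pvOuter over the decoded quality reads
theorem pv_A_char (xs : List String) :
    get_quality_base_one_col xs
      = (fun t : List Int × List Int × List Int =>
          [("quality", t.1), ("read_number", t.2.1), ("position", t.2.2)])
          (pvOuter (pvSeqQ xs 0) 0 ([], [], [])) := by
  simp only [get_quality_base_one_col]
  rw [pv_seqA]
  have hb := pv_foldl_range_enum (d := ([] : List Int))
    (g := fun (d : PySem.Dict String (List Int)) (i : Int) (s : List Int) =>
      (PySem.List.pyRange 0 (s.length : Int) 1).foldl
        (fun d j =>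
          ((d.modify "quality" [] (fun l => l ++ [PySem.List.pyGetD s j 0])).modify
              "read_number" [] (fun l => l ++ [i])).modify
            "position" [] (fun l => l ++ [j + 1])) d)
    (pvSeqQ xs 0) 0 (pvSeqQ xs 0)
    (PySem.Dict.ofList [("quality", []), ("read_number", []), ("position", [])]) (by simp)
  simp only [Nat.cast_zero] at hb
  rw [hb]
  have hinner : ∀ (d : PySem.Dict String (List Int)) (c : Int × List Int),
      (PySem.List.pyRange 0 (c.2.length : Int) 1).foldl
        (fun d j =>
          ((d.modify "quality" [] (fun l => l ++ [PySem.List.pyGetD c.2 j 0])).modify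
              "read_number" [] (fun l => l ++ [c.1])).modify
            "position" [] (fun l => l ++ [j + 1])) d
      = (PySem.List.enumerate c.2).foldl
        (fun d cc =>
          ((d.modify "quality" [] (fun l => l ++ [cc.2])).modify
              "read_number" [] (fun l => l ++ [c.1])).modify
            "position" [] (fun l => l ++ [cc.1 + 1])) d := by
    intro d c
    have := pv_foldl_range_enum (d := (0 : Int))
      (g := fun (d : PySem.Dict String (List Int)) (j : Int) (v : Int) =>
        ((d.modify "quality" [] (fun l => l ++ [v])).modify
            "read_number" [] (fun l => l ++ [c.1])).modify
          "position" [] (fun l => l ++ [j + 1])) c.2 0 c.2 d (by simp)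
    simpa using this
  rw [PySem.List.foldl_congr_mem (PySem.List.enumerate (pvSeqQ xs 0)) _ _
    (PySem.Dict.ofList [("quality", []), ("read_number", []), ("position", [])])
    (fun d c _ => hinner d c)]
  have h0 : (PySem.Dict.ofList [("quality", ([] : List Int)), ("read_number", []), ("position", [])])
      = PySem.Dict.mk [("quality", []), ("read_number", []), ("position", [])] := rfl
  rw [h0, pv_dict_outer]

-- B's inner character loop is pvInner on the decoded read
theorem pv_B_inner (x : String) (c : Int) (st : List Int × List Int × List Int) :
    (PySem.List.enumerate x.toList).foldl
        (fun t cc => (t.1 ++ [(cc.2.toNat : Int) - 33], t.2.1 ++ [c], t.2.2 ++ [cc.1 + 1])) st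
      = pvInner c (pvDecode x) st := by
  unfold pvInner pvDecode
  rw [pv_enumerate_map, List.foldl_map]

-- B's single pass = pvOuter over the decoded quality reads, plus the final counter
theorem pv_B_loop :
    ∀ (xs : List String) (a : Int) (q r p : List Int) (c : Int),
      (PySem.List.enumerate xs a).foldl
          (fun (st : List Int × List Int × List Int × Int) pp =>
            if PySem.Int.mod (pp.1 + 1) 4 == 0 then
              (((PySem.List.enumerate pp.2.toList).foldl
                  (fun (t : List Int × List Int × List Int) cc =>
                    (t.1 ++ [(cc.2.toNat : Int) - 33], t.2.1 ++ [st.2.2.2], t.2.2 ++ [cc.1 + 1]))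
                  (st.1, st.2.1, st.2.2.1)).1,
               ((PySem.List.enumerate pp.2.toList).foldl
                  (fun (t : List Int × List Int × List Int) cc =>
                    (t.1 ++ [(cc.2.toNat : Int) - 33], t.2.1 ++ [st.2.2.2], t.2.2 ++ [cc.1 + 1]))
                  (st.1, st.2.1, st.2.2.1)).2.1,
               ((PySem.List.enumerate pp.2.toList).foldl
                  (fun (t : List Int × List Int × List Int) cc =>
                    (t.1 ++ [(cc.2.toNat : Int) - 33], t.2.1 ++ [st.2.2.2], t.2.2 ++ [cc.1 + 1]))
                  (st.1, st.2.1, st.2.2.1)).2.2,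
               st.2.2.2 + 1)
            else st)
          (q, r, p, c)
        = ((pvOuter (pvSeqQ xs a) c (q, r, p)).1,
           (pvOuter (pvSeqQ xs a) c (q, r, p)).2.1,
           (pvOuter (pvSeqQ xs a) c (q, r, p)).2.2,
           c + ((pvSeqQ xs a).length : Int)) := by
  intro xs
  induction xs with
  | nil => intro a q r p c; simp [PySem.List.enumerate, pvSeqQ, pvOuter]
  | cons x t ih =>
      intro a q r p c
      simp only [PySem.List.enumerate_cons, List.foldl_cons]
      by_cases h : (PySem.Int.mod (a + 1) 4 == 0) = true
      · rw [if_pos h]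
        rw [pv_B_inner x c (q, r, p)]
        rw [ih]
        simp only [pvSeqQ, h, if_true]
        have houter : ∀ (d : List Int) (m : List (List Int)) (cc : Int) (st : List Int × List Int × List Int),
            pvOuter (d :: m) cc st = pvOuter m (cc + 1) (pvInner cc d st) := by
          intro d m cc st
          simp [pvOuter, PySem.List.enumerate_cons]
        rw [houter]
        have hmk : (pvInner c (pvDecode x) (q, r, p)) = ((pvInner c (pvDecode x) (q, r, p)).1,
            (pvInner c (pvDecode x) (q, r, p)).2.1, (pvInner c (pvDecode x) (q, r, p)).2.2) := rfl
        rw [← hmk]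
        simp only [List.length_cons, Prod.mk.injEq]
        refine ⟨trivial, trivial, trivial, by push_cast; ring⟩
      · rw [if_neg h]
        rw [ih]
        simp only [pvSeqQ, h, if_false, Bool.false_eq_true]

-- ===== VERDICT (by name: the statement is the Claim_ definition above) =====
theorem get_quality_base_one_col_spec : Claim_equal_get_quality_base_one_col := by
  intro xs _
  unfold Spec_get_quality_base_one_col
  rw [pv_A_char]
  simp only [get_quality_base_one_col_alt]
  rw [pv_B_loop xs 0 [] [] [] 0]
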